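-- pv_equiv track=rewrite | github.com/futo-org/android-keyboard | tools/make-keyboard-text-py/src/generate.py | transform_texts_dict_to_array
-- ===== SOURCE A (Python) =====
-- def transform_texts_dict_to_array(texts_dict, names):
--     texts = []
--
--     last_idx = 0
--     for name in names:
--         if name in texts_dict:
--             texts.append(texts_dict[name])
--             last_idx = len(texts)
--         else:
--             texts.append(None)
--
--     return texts[:last_idx]
-- ===== SOURCE B (Python) =====
-- def transform_texts_dict_to_array(texts_dict, names):
--     texts = [texts_dict.get(name) for name in names]
--     for i in range(len(names) - 1, -1, -1):
--         if names[i] in texts_dict: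
--             return texts[:i + 1]
--     return []
-- ===== Notes on version B (the rewrite author's own statement) =====
-- stated objective: alternative
-- what changed: B builds the full lookup list in one comprehension and then scans backwards for the last present key to pick the trim point, instead of A's forward loop maintaining a last-hit index accumulator.
import Mathlib
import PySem

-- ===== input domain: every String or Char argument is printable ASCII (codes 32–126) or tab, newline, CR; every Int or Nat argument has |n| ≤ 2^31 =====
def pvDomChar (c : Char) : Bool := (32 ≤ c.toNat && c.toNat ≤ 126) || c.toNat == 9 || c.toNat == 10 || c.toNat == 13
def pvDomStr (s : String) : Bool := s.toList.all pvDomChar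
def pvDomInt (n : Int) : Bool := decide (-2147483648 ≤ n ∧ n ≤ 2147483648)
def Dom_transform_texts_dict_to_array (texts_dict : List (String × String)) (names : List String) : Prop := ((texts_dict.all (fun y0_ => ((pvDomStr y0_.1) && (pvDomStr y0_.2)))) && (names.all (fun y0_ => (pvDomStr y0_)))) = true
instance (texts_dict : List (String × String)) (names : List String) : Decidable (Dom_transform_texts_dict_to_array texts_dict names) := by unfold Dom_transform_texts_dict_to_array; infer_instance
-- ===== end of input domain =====

-- B builds the whole lookup list first and then finds the trim point by a backward scan,
-- instead of A's forward loop carrying a last-hit index accumulator; alternative decomposition, same cost.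

-- ===== PORT A =====
-- 'name in texts_dict' / 'texts_dict[name]' via the association-list dict
def pvGet (d : List (String × String)) (n : String) : Option String := (PySem.Dict.mk d).get? n

-- forward loop: state = (texts so far, last_idx); at the end texts[:last_idx]
def transform_texts_dict_to_array (texts_dict : List (String × String)) (names : List String) : List (Option String) :=
  let st := names.foldl (fun (st : List (Option String) × Nat) name =>
    match pvGet texts_dict name with
    | some v => (st.1 ++ [some v], st.1.length + 1)
    | none => (st.1 ++ [none], st.2)) ([], 0)
  st.1.take st.2   -- texts[:last_idx], last_idx ≥ 0 always

-- ===== PORT B =====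
-- for i in range(len(names)-1, -1, -1): counted-down index loop
def pvAltLoop (texts_dict : List (String × String)) (names : List String)
    (texts : List (Option String)) : Nat → List (Option String)
  | 0 => []
  | i + 1 =>
    if (pvGet texts_dict (names.getD i "")).isSome then texts.take (i + 1)
    else pvAltLoop texts_dict names texts i

def transform_texts_dict_to_array_alt (texts_dict : List (String × String)) (names : List String) : List (Option String) :=
  let texts := names.map (fun n => pvGet texts_dict n)
  pvAltLoop texts_dict names texts names.length

-- ===== PRECONDITION & SPEC =====
def Spec_transform_texts_dict_to_array (texts_dict : List (String × String)) (names : List String) (out : List (Option String)) : Prop := out = transform_texts_dict_to_array_alt texts_dict names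
instance (texts_dict : List (String × String)) (names : List String) (out : List (Option String)) : Decidable (Spec_transform_texts_dict_to_array texts_dict names out) := by unfold Spec_transform_texts_dict_to_array; infer_instance

-- ===== CLAIM (what is proved, stated in full; the proofs are below) =====
def Claim_equal_transform_texts_dict_to_array : Prop := ∀ (texts_dict : List (String × String)) (names : List String), Dom_transform_texts_dict_to_array texts_dict names → Spec_transform_texts_dict_to_array texts_dict names (transform_texts_dict_to_array texts_dict names)

-- ===== LEMMAS AND PROOFS =====

-- "name not in dict" as a Bool predicate
def pvMiss (d : List (String × String)) (n : String) : Bool := (pvGet d n).isNone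

-- trim length of a name list: length after dropping the trailing run of missing keys
def pvK (d : List (String × String)) (l : List String) : Nat :=
  (l.reverse.dropWhile (pvMiss d)).length

theorem pvK_nil (d : List (String × String)) : pvK d [] = 0 := rfl

theorem pvK_cons (d : List (String × String)) (n : String) (l : List String) :
    pvK d (n :: l) = if pvK d l = 0 then (if pvMiss d n then 0 else 1) else pvK d l + 1 := by
  unfold pvK
  simp only [List.reverse_cons, List.dropWhile_append]
  by_cases h : (l.reverse.dropWhile (pvMiss d)).isEmpty
  · simp only [h, if_true]
    rw [List.isEmpty_iff] at h
    simp [h, List.dropWhile]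
    by_cases hm : pvMiss d n <;> simp [hm]
  · simp only [h]
    rw [List.isEmpty_iff] at h
    have : (l.reverse.dropWhile (pvMiss d)).length ≠ 0 := by
      simpa [List.length_eq_zero_iff] using h
    simp [this]

-- characterisation of A's fold with a generalised initial state
theorem pvA_fold (d : List (String × String)) (names : List String)
    (acc : List (Option String)) (li : Nat) :
    names.foldl (fun (st : List (Option String) × Nat) name =>
      match pvGet d name with
      | some v => (st.1 ++ [some v], st.1.length + 1)
      | none => (st.1 ++ [none], st.2)) (acc, li)
    = (acc ++ names.map (fun n => pvGet d n),
       if pvK d names = 0 then li else acc.length + pvK d names) := by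
  induction names generalizing acc li with
  | nil => simp [pvK_nil]
  | cons n rest ih =>
    simp only [List.foldl_cons]
    rcases hg : pvGet d n with _ | v
    · have hmiss : pvMiss d n = true := by simp [pvMiss, hg]
      rw [ih]
      rw [pvK_cons]
      by_cases hk : pvK d rest = 0 <;>
        simp [hk, hmiss, List.map_cons, hg, Nat.add_comm, Nat.add_left_comm]
    · have hmiss : pvMiss d n = false := by simp [pvMiss, hg]
      rw [ih]
      rw [pvK_cons]
      by_cases hk : pvK d rest = 0 <;>
        simp [hk, hmiss, List.map_cons, hg] <;> omega

-- A's result is the mapped list trimmed to pvK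
theorem pvA_eq_take (d : List (String × String)) (names : List String) :
    transform_texts_dict_to_array d names
      = (names.map (fun n => pvGet d n)).take (pvK d names) := by
  unfold transform_texts_dict_to_array
  rw [pvA_fold]
  by_cases hk : pvK d names = 0 <;> simp [hk]

-- pvK of a prefix extended by one element
theorem pvK_take_succ (d : List (String × String)) (names : List String) (i : Nat)
    (hi : i < names.length) :
    pvK d (names.take (i + 1))
      = if pvMiss d (names.getD i "") then pvK d (names.take i) else i + 1 := by
  have hsplit : names.take (i + 1) = names.take i ++ [names.getD i ""] := by
    rw [List.getD_eq_getElem _ _ hi]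
    exact List.take_succ_eq_append_getElem hi
  unfold pvK
  rw [hsplit]
  simp only [List.reverse_append, List.reverse_singleton, List.singleton_append,
    List.dropWhile_cons]
  by_cases hm : pvMiss d ((names[i]?).getD "") <;>
    simp [hm, Nat.min_eq_left (Nat.le_of_lt hi)]

-- B's backward loop computes the same trimmed take
theorem pvB_loop (d : List (String × String)) (names : List String)
    (texts : List (Option String)) (i : Nat) (hi : i ≤ names.length) :
    pvAltLoop d names texts i = texts.take (pvK d (names.take i)) := by
  induction i with
  | zero => simp [pvAltLoop, pvK_nil]
  | succ j ih =>
    have hj : j < names.length := Nat.lt_of_succ_le hi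
    rw [pvAltLoop, pvK_take_succ d names j hj]
    simp only [List.getD_eq_getElem?_getD]
    by_cases hm : pvMiss d ((names[j]?).getD "") = true
    · have hs : (pvGet d ((names[j]?).getD "")).isSome = false := by
        simpa [pvMiss, Option.isNone_iff_eq_none, Option.isSome_iff_ne_none] using hm
      simp [hs, hm, ih (Nat.le_of_lt hj)]
    · have hb : pvMiss d ((names[j]?).getD "") = false := by simpa using hm
      have hs : (pvGet d ((names[j]?).getD "")).isSome = true := by
        simp [pvMiss] at hb
        simpa [Option.isSome_iff_ne_none] using hb
      simp [hs, hb]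

-- ===== VERDICT (by name: the statement is the Claim_ definition above) =====
theorem transform_texts_dict_to_array_spec : Claim_equal_transform_texts_dict_to_array := by
  intro d names _
  unfold Spec_transform_texts_dict_to_array transform_texts_dict_to_array_alt
  rw [pvA_eq_take, pvB_loop d names _ names.length (Nat.le_refl _)]
  simp
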